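-- pv_equiv track=rewrite | github.com/yiyanshou/StS | data/gold_hp_cleaning.py | relics_by_floor
-- ===== SOURCE A (Python) =====
-- def relics_by_floor(relic_changes, floor_reached):
--     if floor_reached == 0:
--         return []
--
--     rbf = [None] * (floor_reached + 1)
--     rbf[0] = relic_changes[0][0]
--
--     for i in range(1, floor_reached + 1):
--         if i in relic_changes:
--             rbf[i] = (rbf[i - 1] | relic_changes[i][0]) - relic_changes[i][1]
--         else:
--             rbf[i] = rbf[i - 1]
--
--     return rbf
-- ===== SOURCE B (Python) =====
-- def relics_by_floor(relic_changes, floor_reached):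
--     if floor_reached == 0:
--         return []
--     rbf = [None] * (floor_reached + 1)
--     rbf[0] = current = relic_changes[0][0]
--     prev = 0
--     for f in sorted(k for k in relic_changes if 1 <= k <= floor_reached):
--         rbf[prev + 1:f] = [current] * (f - prev - 1)
--         add, remove = relic_changes[f]
--         current = (current | add) - remove
--         rbf[f] = current
--         prev = f
--     rbf[prev + 1:] = [current] * (floor_reached - prev)
--     return rbf
-- ===== Notes on version B (the rewrite author's own statement) =====
-- stated objective: alternative
-- what changed: B replaces A's per-floor scan that tests every floor 1..floor_reached for dict membership with an event-driven pass: it sorts the keyed floors once and fills the constant runs between consecutive change floors in bulk via slice assignment.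
import Mathlib
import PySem

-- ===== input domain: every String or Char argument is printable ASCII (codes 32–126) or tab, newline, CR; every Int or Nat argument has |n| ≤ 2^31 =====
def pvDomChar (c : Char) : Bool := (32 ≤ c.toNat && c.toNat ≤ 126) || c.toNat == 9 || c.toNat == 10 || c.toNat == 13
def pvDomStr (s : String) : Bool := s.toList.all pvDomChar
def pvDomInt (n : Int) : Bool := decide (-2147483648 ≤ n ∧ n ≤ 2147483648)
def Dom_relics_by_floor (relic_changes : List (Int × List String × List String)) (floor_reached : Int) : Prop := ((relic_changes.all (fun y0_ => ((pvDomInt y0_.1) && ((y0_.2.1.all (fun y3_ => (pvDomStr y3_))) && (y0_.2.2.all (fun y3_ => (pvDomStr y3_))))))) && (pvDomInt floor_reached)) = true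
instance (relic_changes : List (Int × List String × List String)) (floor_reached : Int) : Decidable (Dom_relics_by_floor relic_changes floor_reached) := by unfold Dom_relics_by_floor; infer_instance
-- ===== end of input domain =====

-- B (alternative): instead of A's scan over every floor 1..floor_reached with a dict
-- membership test per floor, B sorts the keyed change floors once and fills the
-- constant runs between consecutive change floors in bulk by slice assignment.

-- ===== PORT A =====
-- literal port of A: preallocate rbf = [None]*(fr+1), write rbf[0], then for i in
-- range(1, fr+1) write rbf[i] from rbf[i-1] (pySetD/pyGet? are total stand-ins; the
-- out-of-range / missing-key cases are excluded by Pre_relics_by_floor)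
def relics_by_floor (relic_changes : List (Int × List String × List String)) (floor_reached : Int) : List (Option (List String)) :=
  if floor_reached = 0 then []
  else
    let rbf := List.replicate (floor_reached + 1).toNat (none : Option (List String))
    let rbf := PySem.List.pySetD rbf 0 (some (((PySem.Dict.ofList relic_changes).get? 0).getD ([], [])).1)
    (PySem.List.pyRange 1 (floor_reached + 1) 1).foldl (fun rbf i =>
      let prev := ((PySem.List.pyGet? rbf (i - 1)).getD none).getD []
      if (PySem.Dict.ofList relic_changes).contains i then
        let v := ((PySem.Dict.ofList relic_changes).get? i).getD ([], [])
        PySem.List.pySetD rbf i (some (PySem.Set.diff (PySem.Set.union prev v.1) v.2))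
      else
        PySem.List.pySetD rbf i (some prev)) rbf

-- ===== PORT B =====
-- literal port of Source B: rbf[0] = cur = relic_changes[0][0], then for each keyed floor f
-- (sorted, filtered to 1..fr) fill the run rbf[prev+1:f] with cur, apply the change at f,
-- set rbf[f], and finally fill the trailing run rbf[prev+1:].
-- Slice assignment rbf[a:b] = vs is ported by hand as take a ++ vs ++ drop b, which is
-- exact for 0 ≤ a ≤ b ≤ len(rbf) with len(vs) = b - a — the only case B's code reaches
-- (inside Pre_: 0 < prev+1 ≤ f ≤ fr < len(rbf), strictly increasing sorted distinct keys).
def relics_by_floor_alt (relic_changes : List (Int × List String × List String)) (floor_reached : Int) : List (Option (List String)) :=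
  if floor_reached = 0 then []
  else
    let d := PySem.Dict.ofList relic_changes
    let cur0 := ((d.get? 0).getD ([], [])).1
    let rbf := PySem.List.pySetD (List.replicate (floor_reached + 1).toNat (none : Option (List String))) 0 (some cur0)
    let floors := PySem.List.sorted (d.keys.filter (fun k => decide (1 ≤ k) && decide (k ≤ floor_reached))) (fun x => x) false
    let acc := floors.foldl
      (fun (acc : List (Option (List String)) × List String × Int) f =>
        let rbf := acc.1.take (acc.2.2 + 1).toNat ++ List.replicate (f - acc.2.2 - 1).toNat (some acc.2.1) ++ acc.1.drop f.toNat
        let v := (d.get? f).getD ([], [])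
        let cur := PySem.Set.diff (PySem.Set.union acc.2.1 v.1) v.2
        (PySem.List.pySetD rbf f (some cur), cur, f))
      (rbf, cur0, 0)
    acc.1.take (acc.2.2 + 1).toNat ++ List.replicate (floor_reached - acc.2.2).toNat (some acc.2.1)

-- ===== PRECONDITION & SPEC =====
-- Pre_ excludes exactly the inputs where Python A raises: floor_reached < 0
-- (IndexError on rbf[0] = …) and floor_reached ≠ 0 with key 0 absent (KeyError).
def Pre_relics_by_floor (relic_changes : List (Int × List String × List String)) (floor_reached : Int) : Prop :=
  floor_reached = 0 ∨ (0 < floor_reached ∧ ((PySem.Dict.ofList relic_changes).get? 0).isSome = true)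
instance (relic_changes : List (Int × List String × List String)) (floor_reached : Int) : Decidable (Pre_relics_by_floor relic_changes floor_reached) := by unfold Pre_relics_by_floor; infer_instance
def pvWitness_relics_by_floor : (List (Int × List String × List String)) × Int := ([(0, (["a"], ["b"])), (2, (["c"], ["a"]))], 3)

def Spec_relics_by_floor (relic_changes : List (Int × List String × List String)) (floor_reached : Int) (out : List (Option (List String))) : Prop := out = relics_by_floor_alt relic_changes floor_reached
instance (relic_changes : List (Int × List String × List String)) (floor_reached : Int) (out : List (Option (List String))) : Decidable (Spec_relics_by_floor relic_changes floor_reached out) := by unfold Spec_relics_by_floor; infer_instance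

-- ===== CLAIM (what is proved, stated in full; the proofs are below) =====
def Claim_equal_relics_by_floor : Prop := ∀ (relic_changes : List (Int × List String × List String)) (floor_reached : Int), Dom_relics_by_floor relic_changes floor_reached → Pre_relics_by_floor relic_changes floor_reached → Spec_relics_by_floor relic_changes floor_reached (relics_by_floor relic_changes floor_reached)

-- ===== LEMMAS AND PROOFS =====

-- the common per-floor value update
def pvStep (relic_changes : List (Int × List String × List String)) (prev : List String) (i : Int) : List String :=
  if (PySem.Dict.ofList relic_changes).contains i then
    let v := ((PySem.Dict.ofList relic_changes).get? i).getD ([], [])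
    PySem.Set.diff (PySem.Set.union prev v.1) v.2
  else prev

-- the relic set at floor k
def pvG (relic_changes : List (Int × List String × List String)) : Nat → List String
  | 0 => (((PySem.Dict.ofList relic_changes).get? 0).getD ([], [])).1
  | k + 1 => pvStep relic_changes (pvG relic_changes k) ((k : Int) + 1)

-- the rbf array after the floors 1..k are final (n = floor_reached)
def pvS (relic_changes : List (Int × List String × List String)) (n k : Nat) : List (Option (List String)) :=
  (List.range (k + 1)).map (fun j => some (pvG relic_changes j)) ++ List.replicate (n - k) none

theorem pvS_get (rc : List (Int × List String × List String)) (n k : Nat) :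
    (PySem.List.pyGet? (pvS rc n k) (k : Int)) = some (some (pvG rc k)) := by
  simp [pvS, List.getElem?_append]

theorem pv_set_append {α : Type} (xs ys : List α) (v : α) :
    (xs ++ ys).set xs.length v = xs ++ ys.set 0 v := by
  induction xs with
  | nil => simp
  | cons a t ih => simp [ih]

theorem pvA_step (rc : List (Int × List String × List String)) (n k : Nat) (hk : k < n) :
    (fun rbf (i : Int) =>
      let prev := ((PySem.List.pyGet? rbf (i - 1)).getD none).getD []
      if (PySem.Dict.ofList rc).contains i then
        let v := ((PySem.Dict.ofList rc).get? i).getD ([], [])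
        PySem.List.pySetD rbf i (some (PySem.Set.diff (PySem.Set.union prev v.1) v.2))
      else
        PySem.List.pySetD rbf i (some prev)) (pvS rc n k) ((k : Int) + 1)
      = pvS rc n (k + 1) := by
  have hprev : ((PySem.List.pyGet? (pvS rc n k) ((k : Int) + 1 - 1)).getD none).getD [] = pvG rc k := by
    have h : ((k : Int) + 1 - 1) = (k : Int) := by ring
    rw [h, pvS_get]; rfl
  have hrep : List.replicate (n - k) (none : Option (List String)) = none :: List.replicate (n - (k + 1)) none := by
    have h : n - k = (n - (k + 1)) + 1 := by omega
    rw [h, List.replicate_succ]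
  have hset : ∀ v : List String,
      PySem.List.pySetD (pvS rc n k) ((k : Int) + 1) (some v)
        = (List.range (k + 1)).map (fun j => some (pvG rc j)) ++ some v :: List.replicate (n - (k + 1)) none := by
    intro v
    have hcast : ((k : Int) + 1) = ((k + 1 : Nat) : Int) := by push_cast; ring
    have h := pv_set_append ((List.range (k + 1)).map (fun j => some (pvG rc j)))
      (none :: List.replicate (n - (k + 1)) none) (some v)
    simp only [List.length_map, List.length_range, List.set_cons_zero] at h
    rw [hcast, PySem.List.pySetD_natCast, pvS, hrep]
    exact h
  have hR : pvS rc n (k + 1)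
      = (List.range (k + 1)).map (fun j => some (pvG rc j)) ++ some (pvG rc (k + 1)) :: List.replicate (n - (k + 1)) none := by
    rw [pvS, List.range_succ, List.map_append]
    simp
  simp only [hprev, hR]
  by_cases hc : (PySem.Dict.ofList rc).contains ((k : Int) + 1)
  · simp only [hc, if_true, hset]
    simp [pvG, pvStep, hc]
  · simp only [hc, hset]
    simp [pvG, pvStep, hc]

theorem pvA_fold (rc : List (Int × List String × List String)) (n k : Nat) (hk : k ≤ n) :
    (PySem.List.pyRange 1 ((k : Int) + 1) 1).foldl (fun rbf (i : Int) =>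
      let prev := ((PySem.List.pyGet? rbf (i - 1)).getD none).getD []
      if (PySem.Dict.ofList rc).contains i then
        let v := ((PySem.Dict.ofList rc).get? i).getD ([], [])
        PySem.List.pySetD rbf i (some (PySem.Set.diff (PySem.Set.union prev v.1) v.2))
      else
        PySem.List.pySetD rbf i (some prev)) (pvS rc n 0) = pvS rc n k := by
  induction k with
  | zero => simp [PySem.List.pyRange_one_eq_nil]
  | succ k ih =>
    have h1 : (1 : Int) ≤ (k : Int) + 1 := by omega
    have : ((k + 1 : Nat) : Int) + 1 = ((k : Int) + 1) + 1 := by push_cast; ring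
    rw [this, PySem.List.pyRange_one_succ_right h1, List.foldl_append, ih (by omega)]
    simp only [List.foldl_cons, List.foldl_nil]
    exact pvA_step rc n k (by omega)

-- pvG is constant across a stretch with no keyed floor
theorem pvG_const (rc : List (Int × List String × List String)) (a b : Nat) (hab : a ≤ b)
    (h : ∀ j : Nat, a < j → j ≤ b → (PySem.Dict.ofList rc).contains (j : Int) = false) :
    pvG rc b = pvG rc a := by
  induction b with
  | zero =>
    have : a = 0 := by omega
    rw [this]
  | succ b ih =>
    rcases Nat.eq_or_lt_of_le hab with h1 | h1
    · rw [h1]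
    · have hb : a ≤ b := by omega
      have hc : (PySem.Dict.ofList rc).contains ((b : Int) + 1) = false := by
        have := h (b + 1) (by omega) le_rfl
        simpa using this
      rw [pvG, pvStep, hc]
      simp only [Bool.false_eq_true, if_false]
      exact ih hb (fun j hj1 hj2 => h j hj1 (by omega))

-- B's run-fill step over the sorted change floors, from state (pvS n p, pvG p, p)
theorem pvB_step (rc : List (Int × List String × List String)) (n p f' : Nat)
    (hpf : p < f') (hfn : f' ≤ n)
    (hnone : ∀ j : Nat, p < j → j < f' → (PySem.Dict.ofList rc).contains (j : Int) = false)
    (hc : (PySem.Dict.ofList rc).contains ((f' : Nat) : Int) = true) :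
    (fun (acc : List (Option (List String)) × List String × Int) (f : Int) =>
        let rbf := acc.1.take (acc.2.2 + 1).toNat ++ List.replicate (f - acc.2.2 - 1).toNat (some acc.2.1) ++ acc.1.drop f.toNat
        let v := ((PySem.Dict.ofList rc).get? f).getD ([], [])
        let cur := PySem.Set.diff (PySem.Set.union acc.2.1 v.1) v.2
        (PySem.List.pySetD rbf f (some cur), cur, f)) (pvS rc n p, pvG rc p, (p : Int)) ((f' : Nat) : Int)
    = (pvS rc n f', pvG rc f', ((f' : Nat) : Int)) := by
  simp only
  have e1 : ((p : Int) + 1).toNat = p + 1 := by omega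
  have e2 : (((f' : Nat) : Int) - (p : Int) - 1).toNat = f' - p - 1 := by omega
  have e3 : (((f' : Nat) : Int)).toNat = f' := by omega
  have htake : (pvS rc n p).take (p + 1) = (List.range (p + 1)).map (fun j => some (pvG rc j)) := by
    rw [pvS, List.take_append_of_le_length (by simp)]
    simp
  have hdrop : (pvS rc n p).drop f' = List.replicate (n + 1 - f') (none : Option (List String)) := by
    rw [pvS, List.drop_append, List.drop_of_length_le (by simp; omega), List.drop_replicate]
    simp only [List.nil_append, List.length_map, List.length_range]
    congr 1
    omega
  have hGm : pvG rc (f' - 1) = pvG rc p :=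
    pvG_const rc p (f' - 1) (by omega) (fun j h1 h2 => hnone j h1 (by omega))
  have hcur : PySem.Set.diff (PySem.Set.union (pvG rc p)
        (((PySem.Dict.ofList rc).get? ((f' : Nat) : Int)).getD ([], [])).1)
        (((PySem.Dict.ofList rc).get? ((f' : Nat) : Int)).getD ([], [])).2 = pvG rc f' := by
    have hf : f' = (f' - 1) + 1 := by omega
    rw [hf, pvG, pvStep]
    have hcast : (((f' - 1 : Nat) : Int) + 1) = ((f' : Nat) : Int) := by omega
    rw [hcast, hc]
    simp [hGm, hcast]
  have hmid : List.replicate (f' - p - 1) (some (pvG rc p))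
      = (List.range (f' - p - 1)).map ((fun j => some (pvG rc j)) ∘ (fun i => (p + 1) + i)) := by
    symm
    apply List.eq_replicate_iff.mpr
    refine ⟨by simp, ?_⟩
    intro b hb
    simp only [List.mem_map, Function.comp] at hb
    obtain ⟨i, hi, rfl⟩ := hb
    simp only [List.mem_range] at hi
    rw [pvG_const rc p (p + 1 + i) (by omega) (fun j h1 h2 => hnone j h1 (by omega))]
  have hpre : (List.range (p + 1)).map (fun j => some (pvG rc j))
      ++ List.replicate (f' - p - 1) (some (pvG rc p))
      = (List.range f').map (fun j => some (pvG rc j)) := by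
    rw [hmid, ← List.map_map, ← List.map_append, ← List.range_add]
    congr 2
    omega
  have hrep : List.replicate (n + 1 - f') (none : Option (List String))
      = none :: List.replicate (n - f') none := by
    have h : n + 1 - f' = (n - f') + 1 := by omega
    rw [h, List.replicate_succ]
  ext1
  · simp only [e1, e2, e3, htake, hdrop]
    rw [hpre, hrep]
    have hcast : ((f' : Nat) : Int) = (((List.range f').map (fun j => some (pvG rc j))).length : Int) := by
      simp
    rw [hcast, PySem.List.pySetD_natCast]
    rw [pv_set_append]
    simp only [List.set_cons_zero, List.length_map, List.length_range]
    rw [hcur, pvS]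
    rw [List.range_succ, List.map_append]
    simp
  · ext1
    · simp only [hcur]
    · rfl

theorem pvB_fold (rc : List (Int × List String × List String)) (n : Nat) (fs : List Int) (p : Nat)
    (hp : p ≤ n)
    (hmem : ∀ f ∈ fs, (p : Int) < f ∧ f ≤ (n : Int))
    (hsort : fs.Pairwise (· < ·))
    (hcomp : ∀ j : Nat, p < j → j ≤ n → (PySem.Dict.ofList rc).contains (j : Int) = true → (j : Int) ∈ fs)
    (hkeys : ∀ f ∈ fs, (PySem.Dict.ofList rc).contains f = true) :
    ∃ q : Nat, q ≤ n ∧ (∀ j : Nat, q < j → j ≤ n → (PySem.Dict.ofList rc).contains (j : Int) = false) ∧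
    fs.foldl
      (fun (acc : List (Option (List String)) × List String × Int) (f : Int) =>
        let rbf := acc.1.take (acc.2.2 + 1).toNat ++ List.replicate (f - acc.2.2 - 1).toNat (some acc.2.1) ++ acc.1.drop f.toNat
        let v := ((PySem.Dict.ofList rc).get? f).getD ([], [])
        let cur := PySem.Set.diff (PySem.Set.union acc.2.1 v.1) v.2
        (PySem.List.pySetD rbf f (some cur), cur, f))
      (pvS rc n p, pvG rc p, (p : Int))
    = (pvS rc n q, pvG rc q, (q : Int)) := by
  induction fs generalizing p with
  | nil =>
    refine ⟨p, hp, ?_, rfl⟩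
    intro j h1 h2
    by_contra hcc
    have hmemj := hcomp j h1 h2 (by
      cases h : (PySem.Dict.ofList rc).contains (j : Int) with
      | true => rfl
      | false => exact absurd h hcc)
    simp at hmemj
  | cons f fs ih =>
    obtain ⟨hpf, hfn⟩ := hmem f List.mem_cons_self
    have hf0 : (0 : Int) ≤ f := by omega
    set f' : Nat := f.toNat with hf'
    have hfe : f = ((f' : Nat) : Int) := by omega
    have hpf' : p < f' := by omega
    have hfn' : f' ≤ n := by omega
    have hhead : ∀ g ∈ fs, f < g := (List.pairwise_cons.mp hsort).1
    have hnone : ∀ j : Nat, p < j → j < f' → (PySem.Dict.ofList rc).contains (j : Int) = false := by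
      intro j h1 h2
      by_contra hcc
      have hmemj := hcomp j h1 (by omega) (by
        cases h : (PySem.Dict.ofList rc).contains (j : Int) with
        | true => rfl
        | false => exact absurd h hcc)
      rcases List.mem_cons.mp hmemj with h | h
      · omega
      · have := hhead _ h
        omega
    have hc : (PySem.Dict.ofList rc).contains ((f' : Nat) : Int) = true := by
      rw [← hfe]; exact hkeys f List.mem_cons_self
    have hstep := pvB_step rc n p f' hpf' hfn' hnone hc
    simp only [] at hstep
    rw [List.foldl_cons, hfe]
    simp only []
    rw [hstep]
    exact ih f' hfn'
      (fun g hg => ⟨by rw [← hfe]; exact hhead g hg, (hmem g (List.mem_cons_of_mem f hg)).2⟩)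
      (List.pairwise_cons.mp hsort).2
      (fun j h1 h2 hcj => by
        rcases List.mem_cons.mp (hcomp j (by omega) h2 hcj) with h | h
        · exfalso; rw [← h] at hfe; omega
        · exact h)
      (fun g hg => hkeys g (List.mem_cons_of_mem f hg))

-- the trailing fill turns (pvS n q).take (q+1) into the complete array
theorem pvFinal (rc : List (Int × List String × List String)) (n q : Nat) (hq : q ≤ n)
    (hnone : ∀ j : Nat, q < j → j ≤ n → (PySem.Dict.ofList rc).contains (j : Int) = false) :
    (pvS rc n q).take (q + 1) ++ List.replicate (n - q) (some (pvG rc q)) = pvS rc n n := by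
  have htake : (pvS rc n q).take (q + 1) = (List.range (q + 1)).map (fun j => some (pvG rc j)) := by
    rw [pvS, List.take_append_of_le_length (by simp)]
    simp
  have hsplit : List.range (n + 1) = List.range (q + 1) ++ (List.range (n - q)).map (fun i => (q + 1) + i) := by
    have : n + 1 = (q + 1) + (n - q) := by omega
    rw [this, List.range_add]
  have hconstmap : (List.range (n - q)).map ((fun j => some (pvG rc j)) ∘ (fun i => (q + 1) + i))
      = List.replicate (n - q) (some (pvG rc q)) := by
    apply List.eq_replicate_iff.mpr
    refine ⟨by simp, ?_⟩
    intro b hb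
    simp only [List.mem_map, Function.comp] at hb
    obtain ⟨i, hi, rfl⟩ := hb
    simp only [List.mem_range] at hi
    have := pvG_const rc q (q + 1 + i) (by omega) (fun j h1 h2 => hnone j h1 (by omega))
    rw [this]
  rw [htake, pvS, hsplit, List.map_append, List.map_map, hconstmap]
  simp

-- ===== VERDICT (by name: the statement is the Claim_ definition above) =====
theorem relics_by_floor_spec : Claim_equal_relics_by_floor := by
  intro rc fr _ hpre
  unfold Spec_relics_by_floor
  rcases hpre with h0 | ⟨hpos, hsome⟩
  · subst h0; rfl
  · obtain ⟨n, rfl⟩ : ∃ n : Nat, fr = (n : Int) := ⟨fr.toNat, (Int.toNat_of_nonneg (le_of_lt hpos)).symm⟩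
    have hn0 : (n : Int) ≠ 0 := by exact_mod_cast (by omega : n ≠ 0)
    unfold relics_by_floor relics_by_floor_alt
    rw [if_neg hn0, if_neg hn0]
    simp only []
    have hinit : PySem.List.pySetD (List.replicate ((n : Int) + 1).toNat (none : Option (List String))) 0
        (some (((PySem.Dict.ofList rc).get? 0).getD ([], [])).1) = pvS rc n 0 := by
      have h : ((n : Int) + 1).toNat = n + 1 := by omega
      rw [h]
      have h0 : (0 : Int) = ((0 : Nat) : Int) := rfl
      rw [h0, PySem.List.pySetD_natCast]
      simp [pvS, List.replicate_succ, pvG]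
    have hg0 : (((PySem.Dict.ofList rc).get? 0).getD ([], [])).1 = pvG rc 0 := rfl
    -- properties of the sorted filtered key list
    set fl := PySem.List.sorted ((PySem.Dict.ofList rc).keys.filter
      (fun k => decide (1 ≤ k) && decide (k ≤ (n : Int)))) (fun x => x) false with hfl
    have hmemfl : ∀ f, f ∈ fl ↔ (f ∈ (PySem.Dict.ofList rc).keys ∧ 1 ≤ f ∧ f ≤ (n : Int)) := by
      intro f
      rw [hfl, PySem.List.mem_sorted, List.mem_filter]
      simp
    have hnd : fl.Nodup := by
      have h1 : ((PySem.Dict.ofList rc).keys.filter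
          (fun k => decide (1 ≤ k) && decide (k ≤ (n : Int)))).Nodup :=
        (PySem.Dict.nodup_keys_ofList rc).filter _
      rw [hfl]
      exact (PySem.List.sorted_perm _ _ _).symm.nodup h1
    have hle : fl.Pairwise (fun a b => a ≤ b) := by
      have := PySem.List.sorted_pairwise ((PySem.Dict.ofList rc).keys.filter
        (fun k => decide (1 ≤ k) && decide (k ≤ (n : Int)))) (fun x => x)
      simpa [hfl] using this
    have hsort : fl.Pairwise (· < ·) := by
      have := List.Pairwise.and hle hnd
      exact this.imp (fun h => lt_of_le_of_ne h.1 h.2)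
    obtain ⟨q, hq, hnone, heq⟩ := pvB_fold rc n fl 0 (by omega)
      (fun f hf => by
        have := (hmemfl f).mp hf
        exact ⟨by omega, this.2.2⟩)
      hsort
      (fun j h1 h2 hcj => by
        refine (hmemfl (j : Int)).mpr ⟨?_, by omega, by omega⟩
        exact (PySem.Dict.contains_iff_mem_keys _ _).mp hcj)
      (fun f hf => (PySem.Dict.contains_iff_mem_keys _ _).mpr ((hmemfl f).mp hf).1)
    rw [hinit, pvA_fold rc n n le_rfl, hg0]
    have heq' : fl.foldl
        (fun (acc : List (Option (List String)) × List String × Int) (f : Int) =>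
          let rbf := acc.1.take (acc.2.2 + 1).toNat ++ List.replicate (f - acc.2.2 - 1).toNat (some acc.2.1) ++ acc.1.drop f.toNat
          let v := ((PySem.Dict.ofList rc).get? f).getD ([], [])
          let cur := PySem.Set.diff (PySem.Set.union acc.2.1 v.1) v.2
          (PySem.List.pySetD rbf f (some cur), cur, f))
        (pvS rc n 0, pvG rc 0, (0 : Int)) = (pvS rc n q, pvG rc q, (q : Int)) := by
      simpa using heq
    rw [heq']
    simp only []
    have e1 : ((q : Int) + 1).toNat = q + 1 := by omega
    have e2 : ((n : Int) - (q : Int)).toNat = n - q := by omega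
    rw [e1, e2, pvFinal rc n q hq hnone]
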